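-- pv_equiv track=rewrite | github.com/simcoreservers/nutetra | app/controllers/dosing.py | get_growth_phase_for_week
-- ===== SOURCE A (Python) =====
-- def get_growth_phase_for_week(profile, week_num):
--     """Get the growth phase label for a given week"""
--     # If profile has defined growth phases, use those
--     if 'growth_phases' in profile:
--         phases_text = profile['growth_phases']
--         phases = {}
--
--         # Parse the growth phases text
--         for line in phases_text.strip().split('\n'):
--             if ':' in line:
--                 weeks_range, phase_name = line.split(':', 1)
--                 weeks_range = weeks_range.strip()
--                 phase_name = phase_name.strip()
--
--                 # Handle ranges like "1-3" or single values like "4"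
--                 if '-' in weeks_range:
--                     start, end = map(int, weeks_range.split('-'))
--                     for w in range(start, end + 1):
--                         phases[w] = phase_name
--                 else:
--                     phases[int(weeks_range)] = phase_name
--
--         return phases.get(week_num, "Unknown")
--
--     # Default phases for compatibility
--     if 1 <= week_num <= 2:
--         return "Seedling"
--     elif 3 <= week_num <= 5:
--         return "Vegetative"
--     elif week_num == 6:
--         return "Pre-Flower"
--     elif 7 <= week_num <= 11:
--         return "Flowering"
--     elif week_num == 12:
--         return "Flush"
--     else:
--         return "Unknown"
-- ===== SOURCE B (Python) =====
-- def get_growth_phase_for_week(profile, week_num):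
--     """Get the growth phase label for a given week"""
--     if 'growth_phases' in profile:
--         # Scan the lines last-to-first and return the first line whose week
--         # range contains week_num: the last matching line wins, exactly the
--         # dict-overwrite semantics of building a week->phase dict.
--         for line in reversed(profile['growth_phases'].strip().split('\n')):
--             if ':' not in line:
--                 continue
--             weeks_range, phase_name = line.split(':', 1)
--             weeks_range = weeks_range.strip()
--             if '-' in weeks_range:
--                 start, end = map(int, weeks_range.split('-'))
--                 if start <= week_num <= end:
--                     return phase_name.strip()
--             elif int(weeks_range) == week_num:
--                 return phase_name.strip()
--         return "Unknown"
--     # Default phases for compatibility: one table scan instead of an if/elif chain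
--     for lo, hi, name in ((1, 2, "Seedling"), (3, 5, "Vegetative"),
--                          (6, 6, "Pre-Flower"), (7, 11, "Flowering"),
--                          (12, 12, "Flush")):
--         if lo <= week_num <= hi:
--             return name
--     return "Unknown"
-- ===== Notes on version B (the rewrite author's own statement) =====
-- stated objective: alternative
-- what changed: Instead of building a dict that maps every week of every parsed range to its phase and looking week_num up, B scans the lines in reverse and returns the first (= last-written) line whose range or single value contains week_num; the default phases become one table scan instead of an if/elif chain.
import Mathlib
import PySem

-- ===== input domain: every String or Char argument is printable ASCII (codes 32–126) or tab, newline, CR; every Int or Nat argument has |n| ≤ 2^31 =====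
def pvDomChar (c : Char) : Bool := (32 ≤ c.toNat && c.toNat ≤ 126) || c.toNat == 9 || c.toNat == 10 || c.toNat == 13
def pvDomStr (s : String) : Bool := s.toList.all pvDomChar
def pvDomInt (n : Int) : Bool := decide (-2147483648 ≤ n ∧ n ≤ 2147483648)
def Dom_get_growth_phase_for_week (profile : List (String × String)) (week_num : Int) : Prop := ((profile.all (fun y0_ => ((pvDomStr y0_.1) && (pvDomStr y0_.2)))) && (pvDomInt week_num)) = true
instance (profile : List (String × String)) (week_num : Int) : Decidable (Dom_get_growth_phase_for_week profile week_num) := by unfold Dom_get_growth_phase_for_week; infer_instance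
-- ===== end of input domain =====

-- B replaces A's dict that maps every week of every range to its phase by a reverse scan of the
-- lines returning the first (= last-written) line whose range contains week_num: simpler, no dict.

-- ===== PORT A =====
-- one iteration of A's parsing loop: add line's weeks to the phases dict
-- (where Python raises ValueError on a malformed weeks range, this returns the dict unchanged;
--  those inputs are excluded by Pre_)
def pvLineStep (phases : PySem.Dict Int String) (line : String) : PySem.Dict Int String :=
  if PySem.Str.isIn ":" line then
    let parts := (PySem.Str.splitMax? line ":" 1).getD []
    let weeks_range := PySem.Str.strip (parts.getD 0 "")
    let phase_name := PySem.Str.strip (parts.getD 1 "")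
    if PySem.Str.isIn "-" weeks_range then
      match (PySem.Str.split? weeks_range "-").getD [] with
      | [sa, sb] =>
        match PySem.Int.ofStr? sa, PySem.Int.ofStr? sb with
        | some s, some e =>
            (PySem.List.pyRange s (e + 1) 1).foldl (fun d w => d.insert w phase_name) phases
        | _, _ => phases
      | _ => phases
    else
      match PySem.Int.ofStr? weeks_range with
      | some n => phases.insert n phase_name
      | none => phases
  else phases

def get_growth_phase_for_week (profile : List (String × String)) (week_num : Int) : String :=
  match List.lookup "growth_phases" profile with
  | some phases_text =>
      (((PySem.Str.split? (PySem.Str.strip phases_text) "\n").getD []).foldl pvLineStep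
        PySem.Dict.empty).getD week_num "Unknown"
  | none =>
      if 1 ≤ week_num ∧ week_num ≤ 2 then "Seedling"
      else if 3 ≤ week_num ∧ week_num ≤ 5 then "Vegetative"
      else if week_num = 6 then "Pre-Flower"
      else if 7 ≤ week_num ∧ week_num ≤ 11 then "Flowering"
      else if week_num = 12 then "Flush"
      else "Unknown"

-- ===== PORT B =====
-- B's reverse scan: first line (of the already-reversed list) whose range contains week_num
def pvScan (week_num : Int) : List String → String
  | [] => "Unknown"
  | line :: rest =>
    if PySem.Str.isIn ":" line then
      let parts := (PySem.Str.splitMax? line ":" 1).getD []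
      let weeks_range := PySem.Str.strip (parts.getD 0 "")
      if PySem.Str.isIn "-" weeks_range then
        match (PySem.Str.split? weeks_range "-").getD [] with
        | [sa, sb] =>
          match PySem.Int.ofStr? sa, PySem.Int.ofStr? sb with
          | some s, some e =>
              if s ≤ week_num ∧ week_num ≤ e then PySem.Str.strip (parts.getD 1 "")
              else pvScan week_num rest
          | _, _ => pvScan week_num rest
        | _ => pvScan week_num rest
      else
        match PySem.Int.ofStr? weeks_range with
        | some n =>
            if n = week_num then PySem.Str.strip (parts.getD 1 "")
            else pvScan week_num rest
        | none => pvScan week_num rest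
    else pvScan week_num rest

def pvDefaultTable : List (Int × Int × String) :=
  [(1, 2, "Seedling"), (3, 5, "Vegetative"), (6, 6, "Pre-Flower"),
   (7, 11, "Flowering"), (12, 12, "Flush")]

def get_growth_phase_for_week_alt (profile : List (String × String)) (week_num : Int) : String :=
  match List.lookup "growth_phases" profile with
  | some phases_text =>
      pvScan week_num (((PySem.Str.split? (PySem.Str.strip phases_text) "\n").getD []).reverse)
  | none =>
      ((pvDefaultTable.find? (fun t => decide (t.1 ≤ week_num ∧ week_num ≤ t.2.1))).map
        (·.2.2)).getD "Unknown"

-- ===== PRECONDITION & SPEC =====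
-- whether one line's weeks spec (the stripped part before the first ':') parses without a
-- ValueError: a single int, or exactly two ints around a '-'
def pvValidSpec (wr : String) : Bool :=
  if PySem.Str.isIn "-" wr then
    match (PySem.Str.split? wr "-").getD [] with
    | [sa, sb] => (PySem.Int.ofStr? sa).isSome && (PySem.Int.ofStr? sb).isSome
    | _ => false
  else (PySem.Int.ofStr? wr).isSome

-- Pre_ excludes exactly the inputs on which Python A raises ValueError: a growth_phases line
-- containing ':' whose weeks part is not a valid int or "int-int" range.
def Pre_get_growth_phase_for_week (profile : List (String × String)) (week_num : Int) : Prop :=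
  (match List.lookup "growth_phases" profile with
   | none => true
   | some t =>
      ((PySem.Str.split? (PySem.Str.strip t) "\n").getD []).all (fun line =>
        !PySem.Str.isIn ":" line ||
          pvValidSpec (PySem.Str.strip
            (((PySem.Str.splitMax? line ":" 1).getD []).getD 0 ""))) ) = true
instance (profile : List (String × String)) (week_num : Int) : Decidable (Pre_get_growth_phase_for_week profile week_num) := by unfold Pre_get_growth_phase_for_week; infer_instance

def pvWitness_get_growth_phase_for_week : (List (String × String)) × Int :=
  ([("growth_phases", "1-2: Veg\n3: Flower\n1: Seed")], 1)

def Spec_get_growth_phase_for_week (profile : List (String × String)) (week_num : Int) (out : String) : Prop := out = get_growth_phase_for_week_alt profile week_num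
instance (profile : List (String × String)) (week_num : Int) (out : String) : Decidable (Spec_get_growth_phase_for_week profile week_num out) := by unfold Spec_get_growth_phase_for_week; infer_instance

-- ===== CLAIM (what is proved, stated in full; the proofs are below) =====
def Claim_equal_get_growth_phase_for_week : Prop := ∀ (profile : List (String × String)) (week_num : Int), Dom_get_growth_phase_for_week profile week_num → Pre_get_growth_phase_for_week profile week_num → Spec_get_growth_phase_for_week profile week_num (get_growth_phase_for_week profile week_num)

-- ===== LEMMAS AND PROOFS =====

-- pvScan with an arbitrary fallback instead of "Unknown"
def pvScanAux (week_num : Int) (fb : String) : List String → String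
  | [] => fb
  | line :: rest =>
    if PySem.Str.isIn ":" line then
      let parts := (PySem.Str.splitMax? line ":" 1).getD []
      let weeks_range := PySem.Str.strip (parts.getD 0 "")
      if PySem.Str.isIn "-" weeks_range then
        match (PySem.Str.split? weeks_range "-").getD [] with
        | [sa, sb] =>
          match PySem.Int.ofStr? sa, PySem.Int.ofStr? sb with
          | some s, some e =>
              if s ≤ week_num ∧ week_num ≤ e then PySem.Str.strip (parts.getD 1 "")
              else pvScanAux week_num fb rest
          | _, _ => pvScanAux week_num fb rest
        | _ => pvScanAux week_num fb rest
      else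
        match PySem.Int.ofStr? weeks_range with
        | some n =>
            if n = week_num then PySem.Str.strip (parts.getD 1 "")
            else pvScanAux week_num fb rest
        | none => pvScanAux week_num fb rest
    else pvScanAux week_num fb rest

lemma pvScan_eq_aux (w : Int) (ls : List String) : pvScan w ls = pvScanAux w "Unknown" ls := by
  induction ls with
  | nil => rfl
  | cons line rest ih =>
      simp only [pvScan, pvScanAux]
      repeat' split
      all_goals first | rfl | exact ih

lemma getD_foldl_insert_pyRange (a b w : Int) (v dflt : String) (d : PySem.Dict Int String) :
    ((PySem.List.pyRange a b 1).foldl (fun d x => d.insert x v) d).getD w dflt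
      = if a ≤ w ∧ w < b then v else d.getD w dflt := by
  by_cases hab : a < b
  · generalize hn : (b - a).toNat = n
    induction n generalizing a d with
    | zero => omega
    | succ n ih =>
        rw [PySem.List.pyRange_one_cons hab, List.foldl_cons]
        by_cases hab' : a + 1 < b
        · rw [ih (a + 1) (d.insert a v) hab' (by omega)]
          rw [PySem.Dict.getD_insert]
          split_ifs <;> first | rfl | omega
        · rw [PySem.List.pyRange_one_eq_nil (by omega), List.foldl_nil]
          rw [PySem.Dict.getD_insert]
          split_ifs <;> first | rfl | omega
  · rw [PySem.List.pyRange_one_eq_nil (by omega), List.foldl_nil]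
    split_ifs <;> first | rfl | omega

lemma foldl_step_getD (w : Int) (lines : List String) (d : PySem.Dict Int String) :
    (lines.foldl pvLineStep d).getD w "Unknown"
      = pvScanAux w (d.getD w "Unknown") lines.reverse := by
  induction lines using List.reverseRecOn generalizing d with
  | nil => rfl
  | append_singleton ls line ih =>
      rw [List.foldl_append, List.foldl_cons, List.foldl_nil, List.reverse_append,
        List.reverse_singleton, List.singleton_append]
      have ih' := ih d
      simp only [pvLineStep, pvScanAux]
      repeat' split
      all_goals try exact ih'
      · rw [getD_foldl_insert_pyRange]; split_ifs <;> first | omega | rfl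
      · rw [getD_foldl_insert_pyRange]; split_ifs <;> omega
      · rw [PySem.Dict.getD_insert]; split_ifs <;> first | omega | rfl
      · rw [PySem.Dict.getD_insert]; split_ifs <;> omega

lemma default_chain_eq (w : Int) :
    (if 1 ≤ w ∧ w ≤ 2 then "Seedling"
     else if 3 ≤ w ∧ w ≤ 5 then "Vegetative"
     else if w = 6 then "Pre-Flower"
     else if 7 ≤ w ∧ w ≤ 11 then "Flowering"
     else if w = 12 then "Flush"
     else "Unknown")
    = ((pvDefaultTable.find? (fun t => decide (t.1 ≤ w ∧ w ≤ t.2.1))).map (·.2.2)).getD "Unknown" := by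
  simp only [pvDefaultTable, List.find?]
  repeat' split
  all_goals simp_all only [decide_eq_true_eq, decide_eq_false_iff_not]
  all_goals first | rfl | omega | simp_all

-- ===== VERDICT (by name: the statement is the Claim_ definition above) =====
theorem get_growth_phase_for_week_spec : Claim_equal_get_growth_phase_for_week := by
  intro profile week_num _ _
  unfold Spec_get_growth_phase_for_week get_growth_phase_for_week get_growth_phase_for_week_alt
  cases h : List.lookup "growth_phases" profile with
  | none => exact default_chain_eq week_num
  | some t =>
      dsimp only
      rw [foldl_step_getD, pvScan_eq_aux]
      rfl
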